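-- pv_equiv track=rewrite | github.com/JingJiang-web/convert-oneline-notation-to-simple-reflection | convert_oneline_notation_to_simple_reflection.py | convert_notation
-- ===== SOURCE A (Python) =====
-- def convert_notation(notation, n):
--     result = []
--     i = 0
--     while i < len(notation):
--         if notation[i] == 's':
--             i += 1
--             num_str = ""
--             while i < len(notation) and notation[i].isdigit():
--                 num_str += notation[i]
--                 i += 1
--             num = int(num_str)
--             result.append(n - num)
--         elif notation[i] == 'r':
--             result.append(n)
--             i += 1
--         else:
--             i += 1
--     return result
-- ===== SOURCE B (Python) =====
-- def convert_notation(notation, n):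
--     # single right-to-left pass: digits accumulate into `pending` until the
--     # character to their left decides their fate ('s' consumes them, anything
--     # else discards them); results are collected backwards and reversed once.
--     result = []
--     pending = ""
--     for ch in reversed(notation):
--         if ch == 's':
--             result.append(n - int(pending))
--             pending = ""
--         elif ch.isdigit():
--             pending = ch + pending
--         else:
--             if ch == 'r':
--                 result.append(n)
--             pending = ""
--     result.reverse()
--     return result
-- ===== Notes on version B (the rewrite author's own statement) =====
-- stated objective: alternative
-- what changed: Replaces A's cursor-and-inner-while two-level left-to-right parser by a single right-to-left pass with a pending-digits accumulator, collecting results backwards and reversing once.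
import Mathlib
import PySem

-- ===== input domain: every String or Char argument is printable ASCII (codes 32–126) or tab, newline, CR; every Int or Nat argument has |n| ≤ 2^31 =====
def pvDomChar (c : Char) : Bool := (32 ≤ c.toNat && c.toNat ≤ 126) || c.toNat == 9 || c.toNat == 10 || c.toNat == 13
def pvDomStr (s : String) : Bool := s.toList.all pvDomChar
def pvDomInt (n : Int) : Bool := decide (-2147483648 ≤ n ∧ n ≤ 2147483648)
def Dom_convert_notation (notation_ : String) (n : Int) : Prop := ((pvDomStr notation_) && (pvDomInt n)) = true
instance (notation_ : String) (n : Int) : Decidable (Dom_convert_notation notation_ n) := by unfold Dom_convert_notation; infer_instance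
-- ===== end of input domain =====

-- B replaces A's cursor-with-inner-digit-loop parser by one right-to-left pass
-- with a pending-digits accumulator (objective: alternative decomposition).

-- ===== PORT A =====
-- inner `while … isdigit()` loop of A: returns (num_str, remaining chars)
def pvTakeDigits : List Char → List Char × List Char
  | [] => ([], [])
  | c :: t =>
    if PySem.Chars.isdigit c then
      let p := pvTakeDigits t
      (c :: p.1, p.2)
    else ([], c :: t)

theorem pvTakeDigits_len (l : List Char) : (pvTakeDigits l).2.length ≤ l.length := by
  induction l with
  | nil => simp [pvTakeDigits]
  | cons c t ih =>
    simp only [pvTakeDigits]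
    split
    · simpa using Nat.le_succ_of_le ih
    · simp

-- outer while loop of A (the cursor i ↔ the remaining list of characters)
def pvGoA (n : Int) : List Char → List Int
  | [] => []
  | c :: t =>
    if c = 's' then
      let p := pvTakeDigits t
      -- Python raises ValueError if num_str = "" (int("")); excluded by Pre_
      (n - (PySem.Int.ofChars? p.1).getD 0) :: pvGoA n p.2
    else if c = 'r' then
      n :: pvGoA n t
    else pvGoA n t
termination_by l => l.length
decreasing_by
  · exact Nat.lt_succ_of_le (pvTakeDigits_len t)
  · simp
  · simp

def convert_notation (notation_ : String) (n : Int) : List Int :=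
  pvGoA n notation_.toList

-- ===== PORT B =====
-- one step of B's for-loop over reversed(notation); state = (pending, result)
def pvStepB (n : Int) (st : List Char × List Int) (ch : Char) : List Char × List Int :=
  if ch = 's' then
    -- Python raises ValueError if pending = "" (int("")); excluded by Pre_
    ([], st.2 ++ [n - (PySem.Int.ofChars? st.1).getD 0])
  else if PySem.Chars.isdigit ch then
    (ch :: st.1, st.2)
  else
    ([], if ch = 'r' then st.2 ++ [n] else st.2)

def convert_notation_alt (notation_ : String) (n : Int) : List Int :=
  (notation_.toList.reverse.foldl (pvStepB n) ([], [])).2.reverse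

-- ===== PRECONDITION & SPEC =====
-- Pre_ excludes exactly the inputs where Python A raises ValueError (int("")):
-- an 's' that is not immediately followed by an ASCII digit.  (Python B raises
-- there too.)
def pvSOk : List Char → Bool
  | [] => true
  | c :: t =>
    (if c = 's' then (match t with | d :: _ => PySem.Chars.isdigit d | [] => false) else true)
      && pvSOk t

def Pre_convert_notation (notation_ : String) (_n : Int) : Prop :=
  pvSOk notation_.toList = true
instance (notation_ : String) (n : Int) : Decidable (Pre_convert_notation notation_ n) := by
  unfold Pre_convert_notation; infer_instance

def pvWitness_convert_notation : String × Int := ("rs12xr s3", 5)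

def Spec_convert_notation (notation_ : String) (n : Int) (out : List Int) : Prop :=
  out = convert_notation_alt notation_ n
instance (notation_ : String) (n : Int) (out : List Int) : Decidable (Spec_convert_notation notation_ n out) := by
  unfold Spec_convert_notation; infer_instance

-- ===== CLAIM (what is proved, stated in full; the proofs are below) =====
def Claim_equal_convert_notation : Prop := ∀ (notation_ : String) (n : Int), Dom_convert_notation notation_ n → Pre_convert_notation notation_ n → Spec_convert_notation notation_ n (convert_notation notation_ n)

-- ===== LEMMAS AND PROOFS =====

theorem pvDigit_ne_s {c : Char} (h : PySem.Chars.isdigit c = true) : c ≠ 's' := by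
  rintro rfl; simp [PySem.Chars.isdigit] at h

theorem pvDigit_ne_r {c : Char} (h : PySem.Chars.isdigit c = true) : c ≠ 'r' := by
  rintro rfl; simp [PySem.Chars.isdigit] at h

-- A skips characters hitting its else branch; in particular leading digits.
theorem pvGoA_dropWhile (n : Int) (l : List Char) :
    pvGoA n (l.dropWhile PySem.Chars.isdigit) = pvGoA n l := by
  induction l with
  | nil => rfl
  | cons c t ih =>
    by_cases hc : PySem.Chars.isdigit c = true
    · rw [List.dropWhile_cons_of_pos hc, ih, pvGoA,
        if_neg (pvDigit_ne_s hc), if_neg (pvDigit_ne_r hc)]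
    · rw [List.dropWhile_cons_of_neg (by simpa using hc)]

theorem pvTakeDigits_eq (l : List Char) :
    pvTakeDigits l = (l.takeWhile PySem.Chars.isdigit, l.dropWhile PySem.Chars.isdigit) := by
  induction l with
  | nil => rfl
  | cons c t ih =>
    by_cases hc : PySem.Chars.isdigit c = true
    · simp [pvTakeDigits, hc, ih]
    · simp [pvTakeDigits, hc]

-- Invariant of B's backward scan over a suffix-processed prefix l:
-- pending = leading digits of l, and the collected results (reversed)
-- are exactly A's output on l with those leading digits stripped.
theorem pvB_inv (n : Int) (l : List Char) :
    (l.reverse.foldl (pvStepB n) ([], [])).1 = l.takeWhile PySem.Chars.isdigit ∧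
    (l.reverse.foldl (pvStepB n) ([], [])).2.reverse
      = pvGoA n (l.dropWhile PySem.Chars.isdigit) := by
  induction l with
  | nil => simp [pvGoA]
  | cons c t ih =>
    obtain ⟨ih1, ih2⟩ := ih
    rw [List.reverse_cons, List.foldl_append]
    set st := t.reverse.foldl (pvStepB n) (([] : List Char), ([] : List Int)) with hst
    simp only [List.foldl_cons, List.foldl_nil]
    by_cases hs : c = 's'
    · subst hs
      rw [pvStepB, if_pos rfl]
      refine ⟨by simp [PySem.Chars.isdigit], ?_⟩
      rw [List.dropWhile_cons_of_neg (by simp [PySem.Chars.isdigit])]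
      rw [pvGoA, if_pos rfl, pvTakeDigits_eq]
      simp [ih1, ih2]
    · by_cases hd : PySem.Chars.isdigit c = true
      · rw [pvStepB, if_neg hs, if_pos hd]
        refine ⟨by simp [List.takeWhile_cons_of_pos hd, ih1], ?_⟩
        rw [List.dropWhile_cons_of_pos hd, ih2]
      · rw [pvStepB, if_neg hs, if_neg hd]
        refine ⟨by simp [List.takeWhile_cons_of_neg (by simpa using hd)], ?_⟩
        rw [List.dropWhile_cons_of_neg (by simpa using hd)]
        rw [pvGoA, if_neg hs]
        by_cases hr : c = 'r'
        · simp [hr, ih2, pvGoA_dropWhile]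
        · simp [hr, ih2, pvGoA_dropWhile]

-- ===== VERDICT (by name: the statement is the Claim_ definition above) =====
theorem convert_notation_spec : Claim_equal_convert_notation := by
  intro notation_ n _ _
  unfold Spec_convert_notation convert_notation convert_notation_alt
  rw [(pvB_inv n notation_.toList).2, pvGoA_dropWhile]
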